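-- pv_equiv track=rewrite | github.com/datadotworld/data.world-py | datadotworld/models/table_schema.py | _get_types_from_sample
-- ===== SOURCE A (Python) =====
-- def _get_types_from_sample(result_vars, sparql_results_json):
--     """Return types if homogenous within sample
--
--     Compare up to 10 rows of results to determine homogeneity.
--
--     DESCRIBE and CONSTRUCT queries, for example,
--
--     :param result_vars:
--     :param sparql_results_json:
--     """
--     total_bindings = len(sparql_results_json['results']['bindings'])
--     homogeneous_types = {}
--     for result_var in result_vars:
--         var_types = set()
--         var_datatypes = set()
--         for i in range(0, min(total_bindings, 10)):
--             binding = sparql_results_json['results']['bindings'][i]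
--             rdf_term = binding.get(result_var)
--             if rdf_term is not None:  # skip missing values
--                 var_types.add(rdf_term.get('type'))
--                 var_datatypes.add(rdf_term.get('datatype'))
--         if len(var_types) > 1 or len(var_datatypes) > 1:
--             return None  # Heterogeneous types
--         else:
--             homogeneous_types[result_var] = {
--                 'type': var_types.pop() if var_types else None,
--                 'datatype': var_datatypes.pop() if var_datatypes else None
--             }
--
--     return homogeneous_types
-- ===== SOURCE B (Python) =====
-- def _collect(rows):
--     """One pass over the sampled rows: var -> (set of types, set of datatypes)."""
--     collected = {}
--     for row in rows:
--         for var, term in row.items():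
--             types, datatypes = collected.setdefault(var, (set(), set()))
--             types.add(term.get('type'))
--             datatypes.add(term.get('datatype'))
--     return collected
--
--
-- def _summary(collected, var):
--     """Per-variable summary, or None if the variable is heterogeneous."""
--     types, datatypes = collected.get(var, (set(), set()))
--     if len(types) > 1 or len(datatypes) > 1:
--         return None
--     return {'type': next(iter(types)) if types else None,
--             'datatype': next(iter(datatypes)) if datatypes else None}
--
--
-- def _get_types_from_sample(result_vars, sparql_results_json):
--     """Collect all per-variable type sets in one pass over the first 10 rows,
--     then summarise every result_var at once (all-or-nothing)."""
--     collected = _collect(sparql_results_json['results']['bindings'][:10])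
--     summaries = [_summary(collected, v) for v in result_vars]
--     if any(s is None for s in summaries):
--         return None
--     return {v: s for v, s in zip(result_vars, summaries)}
-- ===== Notes on version B (the rewrite author's own statement) =====
-- stated objective: alternative
-- what changed: B transposes the loop nest (one pass over the first 10 rows accumulating per-variable (types,datatypes) sets in a dict instead of rescanning the rows per result_var) and replaces A's early-return accumulator loop by a traverse: it computes every per-variable summary with a helper, returns None if any summary is None, and builds the output dict from the (var, summary) pairs at the end.
import Mathlib
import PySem

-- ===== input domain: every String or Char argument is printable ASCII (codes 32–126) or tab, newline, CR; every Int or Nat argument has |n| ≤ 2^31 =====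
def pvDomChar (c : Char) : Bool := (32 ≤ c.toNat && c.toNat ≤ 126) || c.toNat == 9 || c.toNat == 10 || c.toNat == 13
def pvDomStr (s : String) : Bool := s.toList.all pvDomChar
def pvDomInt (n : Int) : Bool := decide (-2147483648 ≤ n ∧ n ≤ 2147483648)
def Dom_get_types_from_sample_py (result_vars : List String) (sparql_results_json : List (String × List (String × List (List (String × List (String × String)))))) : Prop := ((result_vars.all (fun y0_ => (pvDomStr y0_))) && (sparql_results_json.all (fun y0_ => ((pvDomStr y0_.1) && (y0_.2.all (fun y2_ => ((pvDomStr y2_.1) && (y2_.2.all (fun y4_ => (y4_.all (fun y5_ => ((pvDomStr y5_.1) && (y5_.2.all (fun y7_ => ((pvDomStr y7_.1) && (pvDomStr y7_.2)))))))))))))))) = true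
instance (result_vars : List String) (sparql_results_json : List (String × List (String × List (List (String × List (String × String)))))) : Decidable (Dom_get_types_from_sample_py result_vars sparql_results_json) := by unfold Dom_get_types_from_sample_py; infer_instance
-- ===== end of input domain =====

-- B transposes A's loop nest (one pass over the first 10 rows into a dict of per-variable
-- type sets) and replaces A's early-return loop by a traverse over result_vars.
-- Equivalence is about the RETURN value (neither program mutates its arguments).

-- a binding row: variable name ↦ rdf-term dict
abbrev PvRow : Type := List (String × List (String × String))
-- a pair (var_types, var_datatypes) of Python sets of Optional[str]
abbrev PvPair : Type := PySem.Set (Option String) × PySem.Set (Option String)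

-- shared prologue: sparql_results_json['results']['bindings'] (none = KeyError, excluded by Pre_)
def pvBindings? (sparql_results_json : List (String × List (String × List (List (String × List (String × String)))))) : Option (List PvRow) :=
  match (PySem.Dict.mk sparql_results_json).get? "results" with
  | none => none
  | some r => (PySem.Dict.mk r).get? "bindings"

-- ===== PORT A =====
-- body of A's inner loop for one result_var: binding.get(result_var); skip missing; add type/datatype
def pvStepA (v : String) (q : PvPair) (binding : PvRow) : PvPair :=
  match (PySem.Dict.mk binding).get? v with
  | none => q
  | some term =>
    (PySem.Set.add q.1 ((PySem.Dict.mk term).get? "type"),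
     PySem.Set.add q.2 ((PySem.Dict.mk term).get? "datatype"))

-- A's outer loop over result_vars (early return None on heterogeneity)
def pvGoA (bindings : List PvRow) (vars : List String) (acc : PySem.Dict String (List (String × Option String))) : Option (List (String × List (String × Option String))) :=
  match vars with
  | [] => some acc.items
  | v :: rest =>
    let q := (PySem.List.pyRange 0 (min (bindings.length : Int) 10) 1).foldl
      (fun q i => pvStepA v q (PySem.List.pyGetD bindings i ([] : PvRow)))
      (PySem.Set.empty, PySem.Set.empty)
    if 1 < q.1.length ∨ 1 < q.2.length then none
    else pvGoA bindings rest (acc.insert v [("type", q.1.headD none), ("datatype", q.2.headD none)])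

def get_types_from_sample_py (result_vars : List String) (sparql_results_json : List (String × List (String × List (List (String × List (String × String)))))) : Option (List (String × List (String × Option String))) :=
  match pvBindings? sparql_results_json with
  | none => none   -- A raises KeyError here; outside Pre_
  | some bindings => pvGoA bindings result_vars PySem.Dict.empty

-- ===== PORT B =====
-- _collect's inner loop: fold one row's items into the accumulator dict
def pvInner (d : PySem.Dict String PvPair) (row : PvRow) : PySem.Dict String PvPair :=
  row.foldl (fun d p =>
    d.modify p.1 (PySem.Set.empty, PySem.Set.empty) (fun q =>
      (PySem.Set.add q.1 ((PySem.Dict.mk p.2).get? "type"),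
       PySem.Set.add q.2 ((PySem.Dict.mk p.2).get? "datatype")))) d

-- _summary: per-variable summary, none if heterogeneous
def pvSummary (collected : PySem.Dict String PvPair) (v : String) : Option (List (String × Option String)) :=
  let q := collected.getD v (PySem.Set.empty, PySem.Set.empty)
  if 1 < q.1.length ∨ 1 < q.2.length then none
  else some [("type", q.1.headD none), ("datatype", q.2.headD none)]

-- the comprehension + any-None check + zip of Source B: traverse result_vars into (var, summary) pairs
def pvSummaries (collected : PySem.Dict String PvPair) : List String → Option (List (String × List (String × Option String)))
  | [] => some []
  | v :: rest =>
    match pvSummary collected v, pvSummaries collected rest with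
    | some s, some ss => some ((v, s) :: ss)
    | _, _ => none

def get_types_from_sample_py_alt (result_vars : List String) (sparql_results_json : List (String × List (String × List (List (String × List (String × String)))))) : Option (List (String × List (String × Option String))) :=
  match pvBindings? sparql_results_json with
  | none => none
  | some bindings =>
    let collected := (PySem.List.slice bindings none (some 10)).foldl pvInner PySem.Dict.empty
    match pvSummaries collected result_vars with
    | none => none
    | some pairs =>
      some ((pairs.foldl (fun d p => d.insert p.1 p.2) PySem.Dict.empty).items)

-- ===== PRECONDITION & SPEC =====
-- Pre_ excludes (i) inputs missing the 'results'/'bindings' keys, on which A raises KeyError/TypeError,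
-- and (ii) sampled binding rows whose association list has duplicate keys — such lists do not denote
-- any Python dict (dict keys are unique), so they represent no real input of A.
def Pre_get_types_from_sample_py (result_vars : List String) (sparql_results_json : List (String × List (String × List (List (String × List (String × String)))))) : Prop :=
  (pvBindings? sparql_results_json).isSome = true ∧
  ∀ row ∈ ((pvBindings? sparql_results_json).getD []).take 10, (row.map Prod.fst).Nodup
instance (result_vars : List String) (sparql_results_json : List (String × List (String × List (List (String × List (String × String)))))) : Decidable (Pre_get_types_from_sample_py result_vars sparql_results_json) := by unfold Pre_get_types_from_sample_py; infer_instance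

def pvWitness_get_types_from_sample_py : List String × (List (String × List (String × List (List (String × List (String × String)))))) :=
  (["x", "y"], [("results", [("bindings", [[("x", [("type", "uri")])], [("x", [("type", "uri"), ("datatype", "d")])]])])])

def Spec_get_types_from_sample_py (result_vars : List String) (sparql_results_json : List (String × List (String × List (List (String × List (String × String)))))) (out : Option (List (String × List (String × Option String)))) : Prop := out = get_types_from_sample_py_alt result_vars sparql_results_json
instance (result_vars : List String) (sparql_results_json : List (String × List (String × List (List (String × List (String × String)))))) (out : Option (List (String × List (String × Option String)))) : Decidable (Spec_get_types_from_sample_py result_vars sparql_results_json out) := by unfold Spec_get_types_from_sample_py; infer_instance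

-- ===== CLAIM (what is proved, stated in full; the proofs are below) =====
def Claim_equal_get_types_from_sample_py : Prop := ∀ (result_vars : List String) (sparql_results_json : List (String × List (String × List (List (String × List (String × String)))))), Dom_get_types_from_sample_py result_vars sparql_results_json → Pre_get_types_from_sample_py result_vars sparql_results_json → Spec_get_types_from_sample_py result_vars sparql_results_json (get_types_from_sample_py result_vars sparql_results_json)

-- ===== LEMMAS AND PROOFS =====

-- A's index loop over range(0, m) with m ≤ len(xs) is a fold over xs.take m
theorem pv_rangeFold {S : Type} (f : S → PvRow → S) :
    ∀ (m : Nat) (xs : List PvRow) (init : S), m ≤ xs.length →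
    (PySem.List.pyRange 0 (m : Int) 1).foldl
      (fun s i => f s (PySem.List.pyGetD xs i ([] : PvRow))) init
    = (xs.take m).foldl f init := by
  intro m
  induction m with
  | zero => intro xs init _; simp [PySem.List.pyRange]
  | succ n ih =>
    intro xs init h
    have h1 : (0 : Int) ≤ (n : Int) := by positivity
    have hcast : ((n + 1 : Nat) : Int) = (n : Int) + 1 := by push_cast; ring
    rw [hcast, PySem.List.pyRange_one_succ_right h1, List.foldl_append,
        ih xs init (by omega)]
    have hn : n < xs.length := by omega
    rw [List.take_succ_eq_append_getElem hn]
    have hgd : PySem.List.pyGetD xs (n : Int) ([] : PvRow) = xs[n] := by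
      rw [PySem.List.pyGetD_natCast]
      simp [List.getD_eq_getElem?_getD, List.getElem?_eq_getElem hn]
    simp only [List.foldl_append, List.foldl_cons, List.foldl_nil, hgd]

-- a modify-loop over pairs never touching key v leaves the entry at v unchanged
theorem pv_foldl_modify_of_not_mem {ν : Type} (e : ν) (g : List (String × String) → ν → ν) :
    ∀ (l : PvRow) (d : PySem.Dict String ν) (v : String), v ∉ l.map Prod.fst →
    (l.foldl (fun d p => d.modify p.1 e (g p.2)) d).getD v e = d.getD v e := by
  intro l
  induction l with
  | nil => intro d v _; rfl
  | cons p rest ih =>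
    intro d v hv
    simp only [List.map_cons, List.mem_cons] at hv
    push Not at hv
    simp only [List.foldl_cons]
    rw [ih _ v hv.2, PySem.Dict.getD_modify_of_ne d e (g p.2) hv.1]

-- one modify-loop over a duplicate-free row updates the entry at v by its (unique) value
theorem pv_foldl_modify_getD {ν : Type} (e : ν) (g : List (String × String) → ν → ν) :
    ∀ (l : PvRow) (d : PySem.Dict String ν) (v : String), (l.map Prod.fst).Nodup →
    (l.foldl (fun d p => d.modify p.1 e (g p.2)) d).getD v e
    = (match (PySem.Dict.mk l).get? v with
       | none => d.getD v e
       | some t => g t (d.getD v e)) := by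
  intro l
  induction l with
  | nil => intro d v _; rfl
  | cons p rest ih =>
    intro d v hnd
    obtain ⟨k, t⟩ := p
    simp only [List.map_cons, List.nodup_cons] at hnd
    simp only [List.foldl_cons, PySem.Dict.get?_mk_cons]
    by_cases hk : k = v
    · subst hk
      rw [pv_foldl_modify_of_not_mem e g rest _ k hnd.1,
          PySem.Dict.getD_modify_self]
      simp
    · have hbeq : (k == v) = false := by simp [hk]
      rw [ih _ v hnd.2]
      simp only [hbeq, Bool.false_eq_true, if_false]
      cases (PySem.Dict.mk rest).get? v with
      | none => rw [PySem.Dict.getD_modify_of_ne d e (g t) (fun h => hk h.symm)]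
      | some t' => rw [PySem.Dict.getD_modify_of_ne d e (g t) (fun h => hk h.symm)]

-- B's per-row fold updates the entry at v exactly as A's per-row step does
theorem pv_inner_getD (row : PvRow) (d : PySem.Dict String PvPair) (v : String)
    (hnd : (row.map Prod.fst).Nodup) :
    (pvInner d row).getD v (PySem.Set.empty, PySem.Set.empty)
    = pvStepA v (d.getD v (PySem.Set.empty, PySem.Set.empty)) row := by
  have h := pv_foldl_modify_getD (ν := PvPair) (PySem.Set.empty, PySem.Set.empty)
    (fun t q => (PySem.Set.add q.1 ((PySem.Dict.mk t).get? "type"),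
                 PySem.Set.add q.2 ((PySem.Dict.mk t).get? "datatype")))
    row d v hnd
  exact h

-- accumulate over all rows: B's dict entry at v is A's per-var fold
theorem pv_collected_getD (rows : List PvRow) (v : String)
    (hnd : ∀ row ∈ rows, (row.map Prod.fst).Nodup) :
    ∀ (d : PySem.Dict String PvPair),
    (rows.foldl pvInner d).getD v (PySem.Set.empty, PySem.Set.empty)
    = rows.foldl (pvStepA v) (d.getD v (PySem.Set.empty, PySem.Set.empty)) := by
  induction rows with
  | nil => intro d; rfl
  | cons r rest ih =>
    intro d
    simp only [List.foldl_cons]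
    rw [ih (fun row h => hnd row (List.mem_cons_of_mem _ h)) (pvInner d r),
        pv_inner_getD r d v (hnd r (List.mem_cons_self ..))]

-- A's early-return loop equals B's traverse followed by the dict-building fold
theorem pv_go_eq (bindings : List PvRow)
    (hnd : ∀ row ∈ bindings.take 10, (row.map Prod.fst).Nodup) :
    ∀ (vars : List String) (acc : PySem.Dict String (List (String × Option String))),
    pvGoA bindings vars acc
    = match pvSummaries ((bindings.take 10).foldl pvInner PySem.Dict.empty) vars with
      | none => none
      | some pairs => some ((pairs.foldl (fun d p => d.insert p.1 p.2) acc).items) := by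
  intro vars
  induction vars with
  | nil => intro acc; rfl
  | cons v rest ih =>
    intro acc
    have hmin : min ((bindings.length : Int)) 10 = ((min bindings.length 10 : Nat) : Int) := by
      push_cast; rfl
    have htake : bindings.take (min bindings.length 10) = bindings.take 10 := by
      rw [Nat.min_comm, ← List.take_take, List.take_length]
    have hq : (PySem.List.pyRange 0 (min (bindings.length : Int) 10) 1).foldl
        (fun q i => pvStepA v q (PySem.List.pyGetD bindings i ([] : PvRow)))
        (PySem.Set.empty, PySem.Set.empty)
      = ((bindings.take 10).foldl pvInner PySem.Dict.empty).getD v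
          (PySem.Set.empty, PySem.Set.empty) := by
      rw [hmin, pv_rangeFold (pvStepA v) (min bindings.length 10) bindings _ (by omega),
          htake, pv_collected_getD (bindings.take 10) v hnd PySem.Dict.empty,
          PySem.Dict.getD_empty]
    simp only [pvGoA, pvSummaries, pvSummary, hq]
    split_ifs with h
    · rfl
    · rw [ih (acc.insert v [("type", (((bindings.take 10).foldl pvInner PySem.Dict.empty).getD v
          (PySem.Set.empty, PySem.Set.empty)).1.headD none),
        ("datatype", (((bindings.take 10).foldl pvInner PySem.Dict.empty).getD v
          (PySem.Set.empty, PySem.Set.empty)).2.headD none)])]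
      cases pvSummaries ((bindings.take 10).foldl pvInner PySem.Dict.empty) rest with
      | none => rfl
      | some ss => rfl

-- bindings[:10] is take 10
theorem pv_slice_ten (xs : List PvRow) :
    PySem.List.slice xs none (some 10) = xs.take 10 := by
  simpa using PySem.List.slice_to_natCast xs 10

-- ===== VERDICT (by name: the statement is the Claim_ definition above) =====
theorem get_types_from_sample_py_spec : Claim_equal_get_types_from_sample_py := by
  intro result_vars json _ hpre
  obtain ⟨hsome, hnd⟩ := hpre
  unfold Spec_get_types_from_sample_py
  unfold get_types_from_sample_py get_types_from_sample_py_alt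
  cases hb : pvBindings? json with
  | none => rfl
  | some bindings =>
    rw [hb] at hnd
    simp only [Option.getD_some] at hnd
    simp only [pv_slice_ten]
    exact pv_go_eq bindings hnd result_vars PySem.Dict.empty
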